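-- pv_equiv track=rewrite | github.com/eelectronn/combinatoricsOnWords | register.py | is_necklace
-- ===== SOURCE A (Python) =====
-- def is_necklace(seq):
--     n = len(seq)
--     p = 1
--     for i in range(1, n):
--         if seq[i - p] > seq[i]:
--             return False
--         if seq[i - p] < seq[i]:
--             p = i + 1
--     if n % p != 0:
--         return False
--     return True
-- ===== SOURCE B (Python) =====
-- def is_necklace(seq):
--     n = len(seq)
--     return all(seq <= seq[i:] + seq[:i] for i in range(n))
-- ===== Notes on version B (the rewrite author's own statement) =====
-- stated objective: simpler
-- what changed: Replaces Duval-style period/prenecklace scanning (index loop maintaining a candidate period p, plus a divisibility check) by the definition itself: seq is a necklace iff it is lexicographically <= every rotation seq[i:]+seq[:i].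
import Mathlib
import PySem

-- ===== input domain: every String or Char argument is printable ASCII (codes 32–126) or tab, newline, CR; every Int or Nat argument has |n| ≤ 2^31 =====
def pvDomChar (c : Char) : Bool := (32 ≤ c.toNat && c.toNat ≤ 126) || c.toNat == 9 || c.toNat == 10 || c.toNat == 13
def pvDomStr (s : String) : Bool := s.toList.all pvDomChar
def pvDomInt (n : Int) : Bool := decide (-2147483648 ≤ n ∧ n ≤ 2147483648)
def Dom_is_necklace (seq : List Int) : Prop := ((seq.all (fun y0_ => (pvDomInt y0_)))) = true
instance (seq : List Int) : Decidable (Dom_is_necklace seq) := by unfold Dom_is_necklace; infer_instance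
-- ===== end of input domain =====

-- B replaces A's linear period-maintaining scan by the definition of a necklace
-- (seq is lexicographically ≤ each of its rotations); objective: simpler, not faster.

-- ===== PORT A =====
-- the for-loop of A over range(1, n): early `return False` is `none`, falling through keeps `p`
def pvLoopA (seq : List Int) (is : List Int) (p : Int) : Option Int :=
  match is with
  | [] => some p
  | i :: rest =>
    match PySem.List.pyGet? seq (i - p), PySem.List.pyGet? seq i with
    | some x, some y =>
        if x > y then none
        else if x < y then pvLoopA seq rest (i + 1)
        else pvLoopA seq rest p
    | _, _ => none   -- IndexError (unreachable: 0 ≤ i - p ≤ i < len(seq))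

def is_necklace (seq : List Int) : Bool :=
  match pvLoopA seq (PySem.List.pyRange 1 (PySem.List.len seq) 1) 1 with
  | none => false
  | some p => if PySem.Int.mod (PySem.List.len seq) p ≠ 0 then false else true

-- ===== PORT B =====
-- Python's built-in list comparison `<=` (lexicographic, shorter-prefix-first)
def pvLexLe : List Int → List Int → Bool
  | [], _ => true
  | _ :: _, [] => false
  | x :: s, y :: t => if x < y then true else if y < x then false else pvLexLe s t

def is_necklace_alt (seq : List Int) : Bool :=
  (List.range seq.length).all fun i => pvLexLe seq (seq.drop i ++ seq.take i)

-- ===== PRECONDITION & SPEC =====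
def Spec_is_necklace (seq : List Int) (out : Bool) : Prop := out = is_necklace_alt seq
instance (seq : List Int) (out : Bool) : Decidable (Spec_is_necklace seq out) := by unfold Spec_is_necklace; infer_instance

-- ===== CLAIM (what is proved, stated in full; the proofs are below) =====
def Claim_equal_is_necklace : Prop := ∀ (seq : List Int), Dom_is_necklace seq → Spec_is_necklace seq (is_necklace seq)

-- ===== LEMMAS AND PROOFS =====

-- `w.getD j 0`, the j-th letter of w (only used at j < w.length)
def aIdx (w : List Int) (j : Nat) : Int := w.getD j 0

-- the first i letters of w follow the infinite power of the prefix of length p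
def PerPref (w : List Int) (p i : Nat) : Prop := ∀ j, j < i → aIdx w j = aIdx w (j % p)

-- the prefix u of length p is strictly smaller than each of its proper suffixes,
-- with the witnessing strict difference inside the common part (Lyndon property)
def LynPref (w : List Int) (p : Nat) : Prop :=
  ∀ b, 0 < b → b < p →
    ∃ t, t + b < p ∧ (∀ j, j < t → aIdx w j = aIdx w (b + j)) ∧ aIdx w t < aIdx w (b + t)

theorem mod_shift (b x p : Nat) : (b + x) % p = (b % p + x) % p := by
  conv_lhs => rw [Nat.add_mod]
  conv_rhs => rw [Nat.add_mod, Nat.mod_mod_of_dvd b (dvd_refl p)]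

theorem mod_sub (i p : Nat) (h : p ≤ i) : (i - p) % p = i % p := by
  conv_rhs => rw [show i = (i - p) + p from (Nat.sub_add_cancel h).symm]
  rw [Nat.add_mod_right]

theorem lexle_of_eqAll : ∀ (s t : List Int), s.length = t.length →
    (∀ j, j < s.length → s.getD j 0 = t.getD j 0) → pvLexLe s t = true := by
  intro s
  induction s with
  | nil =>
    intro t hlen _
    cases t with
    | nil => rfl
    | cons y t => simp at hlen
  | cons x s ih =>
    intro t hlen h
    cases t with
    | nil => simp at hlen
    | cons y t =>
      have h0 := h 0 (by simp)
      simp only [List.getD_cons_zero] at h0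
      subst h0
      show (if x < x then true else if x < x then false else pvLexLe s t) = true
      rw [if_neg (lt_irrefl x), if_neg (lt_irrefl x)]
      apply ih
      · simpa using hlen
      · intro j hj
        have := h (j + 1) (by simpa using Nat.succ_lt_succ hj)
        simpa using this

theorem lexle_of_lt : ∀ (s t : List Int) (m : Nat), s.length = t.length → m < s.length →
    (∀ j, j < m → s.getD j 0 = t.getD j 0) → s.getD m 0 < t.getD m 0 → pvLexLe s t = true := by
  intro s
  induction s with
  | nil => intro t m _ hm; simp at hm
  | cons x s ih =>
    intro t m hlen hm h hlt
    cases t with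
    | nil => simp at hlen
    | cons y t =>
      cases m with
      | zero =>
        simp only [List.getD_cons_zero] at hlt
        show (if x < y then true else if y < x then false else pvLexLe s t) = true
        rw [if_pos hlt]
      | succ m =>
        have h0 := h 0 (Nat.succ_pos m)
        simp only [List.getD_cons_zero] at h0
        subst h0
        show (if x < x then true else if x < x then false else pvLexLe s t) = true
        rw [if_neg (lt_irrefl x), if_neg (lt_irrefl x)]
        apply ih t m (by simpa using hlen) (by simpa using hm)
        · intro j hj
          have := h (j + 1) (Nat.succ_lt_succ hj)
          simpa using this
        · simpa using hlt

theorem lexle_false_of_gt : ∀ (s t : List Int) (m : Nat), s.length = t.length → m < s.length →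
    (∀ j, j < m → s.getD j 0 = t.getD j 0) → t.getD m 0 < s.getD m 0 → pvLexLe s t = false := by
  intro s
  induction s with
  | nil => intro t m _ hm; simp at hm
  | cons x s ih =>
    intro t m hlen hm h hgt
    cases t with
    | nil => simp at hlen
    | cons y t =>
      cases m with
      | zero =>
        simp only [List.getD_cons_zero] at hgt
        show (if x < y then true else if y < x then false else pvLexLe s t) = false
        rw [if_neg (not_lt.mpr (le_of_lt hgt)), if_pos hgt]
      | succ m =>
        have h0 := h 0 (Nat.succ_pos m)
        simp only [List.getD_cons_zero] at h0
        subst h0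
        show (if x < x then true else if x < x then false else pvLexLe s t) = false
        rw [if_neg (lt_irrefl x), if_neg (lt_irrefl x)]
        apply ih t m (by simpa using hlen) (by simpa using hm)
        · intro j hj
          have := h (j + 1) (Nat.succ_lt_succ hj)
          simpa using this
        · simpa using hgt

theorem rot_getD (w : List Int) (m j : Nat) (hm : m < w.length) (hj : j < w.length) :
    (w.drop m ++ w.take m).getD j 0 = aIdx w ((m + j) % w.length) := by
  have hlen : (w.drop m).length = w.length - m := List.length_drop
  by_cases hc : j < w.length - m
  · rw [List.getD_append _ _ _ _ (by rw [hlen]; omega)]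
    rw [List.getD_eq_getElem?_getD, List.getElem?_drop, ← List.getD_eq_getElem?_getD]
    unfold aIdx
    rw [Nat.mod_eq_of_lt (by omega)]
  · rw [List.getD_append_right _ _ _ _ (by rw [hlen]; omega), hlen]
    rw [List.getD_eq_getElem?_getD, List.getElem?_take_of_lt (by omega),
      ← List.getD_eq_getElem?_getD]
    unfold aIdx
    rw [Nat.mod_eq_sub_mod (by omega), Nat.mod_eq_of_lt (by omega)]
    congr 1
    omega

theorem rot_length (w : List Int) (m : Nat) : (w.drop m ++ w.take m).length = w.length := by
  simp
  omega

theorem alt_false_of_rot (w : List Int) (m : Nat) (hmn : m < w.length)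
    (h : pvLexLe w (w.drop m ++ w.take m) = false) : is_necklace_alt w = false := by
  unfold is_necklace_alt
  rw [List.all_eq_false]
  exact ⟨m, List.mem_range.mpr hmn, by simp [h]⟩

theorem K1_reject (w : List Int) (p i : Nat) (hp : 1 ≤ p) (hpi : p ≤ i) (hin : i < w.length)
    (hper : PerPref w p i) (hlt : aIdx w i < aIdx w (i - p)) : is_necklace_alt w = false := by
  apply alt_false_of_rot w p (by omega)
  apply lexle_false_of_gt w _ (i - p) (rot_length w p).symm (by omega)
  · intro j hj
    rw [rot_getD w p j (by omega) (by omega)]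
    have h1 : (p + j) % w.length = p + j := Nat.mod_eq_of_lt (by omega)
    rw [h1]
    have h2 : aIdx w (p + j) = aIdx w ((p + j) % p) := hper (p + j) (by omega)
    have h3 : (p + j) % p = j % p := Nat.add_mod_left p j
    have h4 : aIdx w j = aIdx w (j % p) := hper j (by omega)
    show aIdx w j = aIdx w (p + j)
    rw [h4, h2, h3]
  · rw [rot_getD w p (i - p) (by omega) (by omega)]
    have h1 : p + (i - p) = i := by omega
    rw [h1, Nat.mod_eq_of_lt hin]
    exact hlt

theorem K2_accept (w : List Int) (p : Nat) (hp : 1 ≤ p) (hdvd : p ∣ w.length)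
    (hper : PerPref w p w.length) (hlyn : LynPref w p) : is_necklace_alt w = true := by
  unfold is_necklace_alt
  rw [List.all_eq_true]
  intro m hm
  rw [List.mem_range] at hm
  have hn0 : 0 < w.length := by omega
  have hpn : p ≤ w.length := Nat.le_of_dvd hn0 hdvd
  have key : ∀ j, j < w.length →
      (w.drop m ++ w.take m).getD j 0 = aIdx w ((m % p + j) % p) := by
    intro j hj
    rw [rot_getD w m j hm hj]
    have h1 : aIdx w ((m + j) % w.length) = aIdx w ((m + j) % w.length % p) :=
      hper _ (Nat.mod_lt _ hn0)
    rw [h1, Nat.mod_mod_of_dvd _ hdvd, mod_shift]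
  by_cases hb : m % p = 0
  · apply lexle_of_eqAll _ _ (rot_length w m).symm
    intro j hj
    rw [key j hj, hb, Nat.zero_add]
    exact hper j hj
  · obtain ⟨t, htb, hchain, hstrict⟩ :=
      hlyn (m % p) (Nat.pos_of_ne_zero hb) (Nat.mod_lt _ (by omega))
    apply lexle_of_lt w _ t (rot_length w m).symm (by omega)
    · intro j hj
      rw [key j (by omega), Nat.mod_eq_of_lt (by omega)]
      exact hchain j hj
    · rw [key t (by omega), Nat.mod_eq_of_lt (by omega)]
      exact hstrict

theorem K3_reject (w : List Int) (p : Nat) (hp : 1 ≤ p) (hpn : p ≤ w.length)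
    (hndvd : ¬ p ∣ w.length) (hper : PerPref w p w.length) (hlyn : LynPref w p) :
    is_necklace_alt w = false := by
  have hr0 : 0 < w.length % p := by
    rcases Nat.eq_zero_or_pos (w.length % p) with h | h
    · exact absurd (Nat.dvd_of_mod_eq_zero h) hndvd
    · exact h
  have hrp : w.length % p < p := Nat.mod_lt _ (by omega)
  have hplt : p < w.length := by
    rcases Nat.lt_or_ge p w.length with h | h
    · exact h
    · exact absurd ⟨1, by omega⟩ hndvd
  set r := w.length % p with hrdef
  set m := w.length - r with hmdef
  have hmmod : m % p = 0 := by
    have hdm : m = p * (w.length / p) := by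
      have := Nat.div_add_mod w.length p
      omega
    rw [hdm]
    exact Nat.mul_mod_right _ _
  obtain ⟨t, htb, hchain, hstrict⟩ := hlyn r hr0 hrp
  apply alt_false_of_rot w m (by omega)
  apply lexle_false_of_gt w _ (r + t) (rot_length w m).symm (by omega)
  · intro j hj
    rw [rot_getD w m j (by omega) (by omega)]
    rcases Nat.lt_or_ge j r with hjr | hjr
    · have h1 : (m + j) % w.length = m + j := Nat.mod_eq_of_lt (by omega)
      rw [h1]
      have h2 : aIdx w (m + j) = aIdx w ((m + j) % p) := hper _ (by omega)
      rw [h2, mod_shift, hmmod, Nat.zero_add, Nat.mod_eq_of_lt (by omega)]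
      rfl
    · have hx : j = r + (j - r) := by omega
      have h1 : (m + j) % w.length = j - r := by
        rw [Nat.mod_eq_sub_mod (by omega), Nat.mod_eq_of_lt (by omega)]
        omega
      rw [h1]
      calc aIdx w j = aIdx w (r + (j - r)) := by rw [← hx]
        _ = aIdx w (j - r) := (hchain (j - r) (by omega)).symm
  · rw [rot_getD w m (r + t) (by omega) (by omega)]
    have h1 : (m + (r + t)) % w.length = t := by
      rw [Nat.mod_eq_sub_mod (by omega), Nat.mod_eq_of_lt (by omega)]
      omega
    rw [h1]
    exact hstrict

theorem K4_lyn_update (w : List Int) (p i : Nat) (hp : 1 ≤ p) (hpi : p ≤ i)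
    (hper : PerPref w p i) (hlyn : LynPref w p) (hc : aIdx w (i % p) < aIdx w i) :
    LynPref w (i + 1) := by
  intro b hb hbi
  have hbile : b ≤ i := by omega
  by_cases hb0 : b % p = 0
  · refine ⟨i - b, by omega, ?_, ?_⟩
    · intro j hj
      have h1 : aIdx w (b + j) = aIdx w ((b + j) % p) := hper _ (by omega)
      rw [h1, mod_shift, hb0, Nat.zero_add]
      exact hper j (by omega)
    · have h1 : aIdx w (i - b) = aIdx w ((i - b) % p) := hper _ (by omega)
      have h2 : (i - b) % p = i % p := by
        conv_rhs => rw [show i = (i - b) + b from by omega]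
        rw [Nat.add_mod, hb0, Nat.add_zero, Nat.mod_mod_of_dvd _ (dvd_refl p)]
      rw [show b + (i - b) = i from by omega, h1, h2]
      exact hc
  · have hb'p : b % p < p := Nat.mod_lt _ (by omega)
    obtain ⟨t0, ht0, hchain0, hstrict0⟩ := hlyn (b % p) (Nat.pos_of_ne_zero hb0) hb'p
    have hbmod : ∀ x, x < t0 + 1 → (b + x) % p = b % p + x := by
      intro x hx
      rw [mod_shift, Nat.mod_eq_of_lt (by omega)]
    have hdisj : i - b ≤ t0 ∨ t0 < i - b := by omega
    rcases hdisj with hcase | hcase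
    · refine ⟨i - b, by omega, ?_, ?_⟩
      · intro j hj
        have h1 : aIdx w (b + j) = aIdx w ((b + j) % p) := hper _ (by omega)
        rw [h1, hbmod j (by omega)]
        exact hchain0 j (by omega)
      · rw [show b + (i - b) = i from by omega]
        have hipb : i % p = b % p + (i - b) := by
          conv_lhs => rw [show i = b + (i - b) from by omega]
          exact hbmod (i - b) (by omega)
        rcases Nat.lt_or_ge (i - b) t0 with hlt | hge
        · rw [hchain0 (i - b) hlt, ← hipb]
          exact hc
        · have hieq : i - b = t0 := by omega
          rw [hieq]
          calc aIdx w t0 < aIdx w (b % p + t0) := hstrict0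
            _ = aIdx w (i % p) := by rw [hipb, hieq]
            _ < aIdx w i := hc
    · refine ⟨t0, by omega, ?_, ?_⟩
      · intro j hj
        have h1 : aIdx w (b + j) = aIdx w ((b + j) % p) := hper _ (by omega)
        rw [h1, hbmod j (by omega)]
        exact hchain0 j hj
      · have h1 : aIdx w (b + t0) = aIdx w ((b + t0) % p) := hper _ (by omega)
        rw [h1, hbmod t0 (by omega)]
        exact hstrict0

theorem loop_main (w : List Int) : ∀ (k i p : Nat), w.length - i = k → 1 ≤ p → p ≤ i →
    i ≤ w.length → PerPref w p i → LynPref w p →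
    (pvLoopA w (PySem.List.pyRange (i : Int) (w.length : Int) 1) (p : Int) = none →
      is_necklace_alt w = false) ∧
    (∀ q, pvLoopA w (PySem.List.pyRange (i : Int) (w.length : Int) 1) (p : Int) = some q →
      ∃ p' : Nat, q = (p' : Int) ∧ 1 ≤ p' ∧ p' ≤ w.length ∧
        PerPref w p' w.length ∧ LynPref w p') := by
  intro k
  induction k with
  | zero =>
    intro i p hk hp hpi hin hper hlyn
    have hieq : i = w.length := by omega
    rw [PySem.List.pyRange_one_eq_nil (by exact_mod_cast le_of_eq hieq.symm)]
    constructor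
    · intro h
      simp [pvLoopA] at h
    · intro q hq
      simp only [pvLoopA, Option.some.injEq] at hq
      exact ⟨p, hq.symm, hp, by omega, hieq ▸ hper, hlyn⟩
  | succ k ih =>
    intro i p hk hp hpi hin hper hlyn
    have hilt : i < w.length := by omega
    have hget1 : PySem.List.pyGet? w ((i : Int) - (p : Int)) = some (aIdx w (i - p)) := by
      rw [show ((i : Int) - (p : Int)) = ((i - p : Nat) : Int) from by omega,
        PySem.List.pyGet?_natCast, List.getElem?_eq_getElem (by omega)]
      unfold aIdx
      rw [List.getD_eq_getElem w 0 (by omega)]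
    have hget2 : PySem.List.pyGet? w (i : Int) = some (aIdx w i) := by
      rw [PySem.List.pyGet?_natCast, List.getElem?_eq_getElem (by omega)]
      unfold aIdx
      rw [List.getD_eq_getElem w 0 (by omega)]
    have hc1 : ((i : Int) + 1) = ((i + 1 : Nat) : Int) := by push_cast; ring
    have hstep : pvLoopA w (PySem.List.pyRange (i : Int) (w.length : Int) 1) (p : Int) =
        (if aIdx w (i - p) > aIdx w i then none
         else if aIdx w (i - p) < aIdx w i then
           pvLoopA w (PySem.List.pyRange ((i : Int) + 1) (w.length : Int) 1) ((i : Int) + 1)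
         else pvLoopA w (PySem.List.pyRange ((i : Int) + 1) (w.length : Int) 1) (p : Int)) := by
      rw [PySem.List.pyRange_one_cons (by exact_mod_cast hilt)]
      show (match PySem.List.pyGet? w ((i : Int) - (p : Int)), PySem.List.pyGet? w (i : Int) with
        | some x, some y =>
            if x > y then none
            else if x < y then
              pvLoopA w (PySem.List.pyRange ((i : Int) + 1) (w.length : Int) 1) ((i : Int) + 1)
            else pvLoopA w (PySem.List.pyRange ((i : Int) + 1) (w.length : Int) 1) (p : Int)
        | _, _ => none) = _
      rw [hget1, hget2]
    rw [hstep, hc1]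
    split_ifs with hgt hlt
    · exact ⟨fun _ => K1_reject w p i hp hpi hilt hper hgt, fun q hq => by simp at hq⟩
    · have hci : aIdx w (i % p) < aIdx w i := by
        have h1 : aIdx w (i - p) = aIdx w ((i - p) % p) := hper _ (by omega)
        rw [← mod_sub i p hpi, ← h1]
        exact hlt
      exact ih (i + 1) (i + 1) (by omega) (by omega) (le_refl _) (by omega)
        (fun j hj => by rw [Nat.mod_eq_of_lt hj])
        (K4_lyn_update w p i hp hpi hper hlyn hci)
    · have hgt' : ¬ aIdx w i < aIdx w (i - p) := hgt
      have heq : aIdx w i = aIdx w (i - p) := le_antisymm (not_lt.mp hlt) (not_lt.mp hgt')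
      refine ih (i + 1) p (by omega) hp (by omega) (by omega) ?_ hlyn
      intro j hj
      rcases Nat.lt_or_ge j i with hji | hji
      · exact hper j hji
      · have hjeq : j = i := by omega
        subst hjeq
        rw [heq, hper (j - p) (by omega), mod_sub j p hpi]

-- ===== VERDICT (by name: the statement is the Claim_ definition above) =====
theorem is_necklace_spec : Claim_equal_is_necklace := by
  intro seq _
  show is_necklace seq = is_necklace_alt seq
  rcases Nat.eq_zero_or_pos seq.length with h0 | hpos
  · have hnil : seq = [] := List.length_eq_zero_iff.mp h0
    subst hnil
    rfl
  · obtain ⟨hnone, hsome⟩ := loop_main seq (seq.length - 1) 1 1 (by omega) (le_refl 1)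
      (le_refl 1) hpos
      (fun j hj => by
        have : j = 0 := by omega
        subst this
        rfl)
      (fun b hb hbp => absurd hbp (by omega))
    simp only [Nat.cast_one] at hnone hsome
    unfold is_necklace
    rw [show PySem.List.len seq = (seq.length : Int) from by simp]
    rcases hres : pvLoopA seq (PySem.List.pyRange 1 (seq.length : Int) 1) 1 with _ | q
    · exact (hnone hres).symm
    · obtain ⟨p', rfl, hp1, hpn', hper, hlyn⟩ := hsome q hres
      show (if PySem.Int.mod (seq.length : Int) (p' : Int) ≠ 0 then false else true) =
        is_necklace_alt seq
      rw [show PySem.Int.mod (seq.length : Int) (p' : Int) = ((seq.length % p' : Nat) : Int)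
        from by simp]
      by_cases hdvd : p' ∣ seq.length
      · obtain ⟨c, hcc⟩ := hdvd
        have hz : seq.length % p' = 0 := by rw [hcc]; exact Nat.mul_mod_right _ _
        rw [hz, if_neg (by simp)]
        exact (K2_accept seq p' hp1 ⟨c, hcc⟩ hper hlyn).symm
      · have hz : seq.length % p' ≠ 0 := fun h => hdvd (Nat.dvd_of_mod_eq_zero h)
        rw [if_pos (by exact_mod_cast hz)]
        exact (K3_reject seq p' hp1 hpn' hdvd hper hlyn).symm
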